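-- pv_equiv track=rewrite | github.com/Stuflo19/AdventOfCode | 14/solution.py | find_appearances
-- ===== SOURCE A (Python) =====
-- def find_appearances(pairs):
--     dictlen = len(pairs)
--     dictpos = 0
--     individual_chars = {}
--
--     for pair in pairs:
--         if pair[0] not in individual_chars:
--             individual_chars[pair[0]] = pairs[pair]
--         else:
--             individual_chars[pair[0]] += pairs[pair]
--
--     return individual_chars
-- ===== SOURCE B (Python) =====
-- def find_appearances(pairs):
--     firsts = list(dict.fromkeys(k[0] for k in pairs))
--     return {c: sum(v for k, v in pairs.items() if k[0] == c) for c in firsts}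
-- ===== Notes on version B (the rewrite author's own statement) =====
-- stated objective: simpler
-- what changed: Replaces the hash-accumulate loop (insert-or-increment per key) by a two-phase pass: ordered dedup of first characters, then one filtered sum per distinct first character via a dict comprehension.
import Mathlib
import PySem

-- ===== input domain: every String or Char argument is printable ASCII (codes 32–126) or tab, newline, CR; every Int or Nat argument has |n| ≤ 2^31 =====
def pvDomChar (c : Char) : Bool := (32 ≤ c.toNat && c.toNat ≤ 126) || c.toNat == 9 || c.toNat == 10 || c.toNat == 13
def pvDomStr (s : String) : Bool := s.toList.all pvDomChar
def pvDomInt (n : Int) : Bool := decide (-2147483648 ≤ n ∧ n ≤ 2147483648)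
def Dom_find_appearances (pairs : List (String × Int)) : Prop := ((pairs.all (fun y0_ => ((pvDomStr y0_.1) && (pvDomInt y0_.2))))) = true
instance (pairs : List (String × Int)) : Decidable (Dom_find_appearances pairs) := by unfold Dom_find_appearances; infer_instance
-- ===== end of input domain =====

-- B replaces A's insert-or-increment dict loop by an ordered dedup of first characters
-- followed by one filtered sum per distinct first character (objective: simpler).


-- shared helper: Python's k[0] as a one-character string (the "" branch is reached only
-- outside Pre_, where A raises IndexError)
def pvFirst (s : String) : String :=
  match PySem.Str.pyGet? s 0 with
  | some c => String.ofList [c]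
  | none => ""

-- ===== PORT A =====
-- 'for pair in pairs' iterates the dict's KEYS; 'pairs[pair]' re-looks the value up.
def find_appearances (pairs : List (String × Int)) : List (String × Int) :=
  let keys := pairs.map Prod.fst
  let d := keys.foldl (fun d k =>
      let c := pvFirst k
      let v := ((PySem.Dict.mk pairs).get? k).getD 0
      if !(d.contains c) then d.insert c v else d.modify c 0 (· + v))
    PySem.Dict.empty
  d.items

-- ===== PORT B =====
def find_appearances_alt (pairs : List (String × Int)) : List (String × Int) :=
  let firsts := PySem.List.dedup (pairs.map (fun kv => pvFirst kv.1))
  firsts.map (fun c => (c, ((pairs.filter (fun kv => pvFirst kv.1 == c)).map Prod.snd).sum))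

-- ===== PRECONDITION & SPEC =====
-- Pre_ states the dict invariant of the Python argument (distinct keys: the List is an
-- association list standing for a dict) and excludes zero-length string keys, on which
-- A's pair[0] raises IndexError.
def Pre_find_appearances (pairs : List (String × Int)) : Prop :=
  (pairs.map Prod.fst).Nodup ∧ ∀ kv ∈ pairs, kv.1 ≠ ""
instance (pairs : List (String × Int)) : Decidable (Pre_find_appearances pairs) := by unfold Pre_find_appearances; infer_instance
def pvWitness_find_appearances : (List (String × Int)) := [("ab", 2), ("ac", 3), ("ba", 1)]

def Spec_find_appearances (pairs : List (String × Int)) (out : List (String × Int)) : Prop := out = find_appearances_alt pairs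
instance (pairs : List (String × Int)) (out : List (String × Int)) : Decidable (Spec_find_appearances pairs out) := by unfold Spec_find_appearances; infer_instance

-- ===== CLAIM (what is proved, stated in full; the proofs are below) =====
def Claim_equal_find_appearances : Prop := ∀ (pairs : List (String × Int)), Dom_find_appearances pairs → Pre_find_appearances pairs → Spec_find_appearances pairs (find_appearances pairs)

-- ===== LEMMAS AND PROOFS =====

def pvSum (l : List (String × Int)) (c : String) : Int :=
  ((l.filter (fun kv => pvFirst kv.1 == c)).map Prod.snd).sum

theorem pvSum_append (l : List (String × Int)) (kv : String × Int) (c : String) :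
    pvSum (l ++ [kv]) c = pvSum l c + (if pvFirst kv.1 = c then kv.2 else 0) := by
  simp only [pvSum, List.filter_append, List.map_append, List.sum_append]
  congr 1
  by_cases h : pvFirst kv.1 = c <;> simp [h]

theorem pv_dedup_append (xs : List String) (x : String) :
    PySem.List.dedup (xs ++ [x]) =
      if x ∈ PySem.List.dedup xs then PySem.List.dedup xs else PySem.List.dedup xs ++ [x] := by
  simp [PySem.List.dedup_eq_ofList, PySem.Set.ofList_eq_foldl, List.foldl_append,
    PySem.Set.add, PySem.Set.contains]

theorem pv_group_lemma (l : List (String × Int)) :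
    (l.foldl (fun d kv =>
        let c := pvFirst kv.1
        if !(d.contains c) then d.insert c kv.2 else d.modify c 0 (· + kv.2))
      PySem.Dict.empty).items
    = (PySem.List.dedup (l.map (fun kv => pvFirst kv.1))).map
        (fun c => (c, pvSum l c)) := by
  induction l using List.reverseRecOn with
  | nil => rfl
  | append_singleton l kv ih =>
    rw [List.foldl_append, List.foldl_cons, List.foldl_nil]
    set F := (l.foldl (fun d kv =>
        let c := pvFirst kv.1
        if !(d.contains c) then d.insert c kv.2 else d.modify c 0 (· + kv.2))
      PySem.Dict.empty) with hF
    have hkeys : F.keys = PySem.List.dedup (l.map (fun kv => pvFirst kv.1)) := by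
      simp [PySem.Dict.keys, ih, Function.comp_def]
    have hnd : F.keys.Nodup := by rw [hkeys]; exact PySem.List.nodup_dedup _
    have hcont : F.contains (pvFirst kv.1)
        = decide (pvFirst kv.1 ∈ PySem.List.dedup (l.map (fun kv => pvFirst kv.1))) := by
      rw [PySem.Dict.contains_eq_decide_mem_keys, hkeys]
    rw [List.map_append]
    simp only [List.map_cons, List.map_nil]
    rw [pv_dedup_append]
    by_cases hc : pvFirst kv.1 ∈ PySem.List.dedup (l.map (fun kv => pvFirst kv.1))
    · -- already present: modify branch
      have hcv : F.getD (pvFirst kv.1) 0 = pvSum l (pvFirst kv.1) := by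
        exact PySem.Dict.getD_of_mem_items F (by rw [ih]; exact List.mem_map_of_mem hc) hnd 0
      rw [if_pos hc]
      have hct : F.contains (pvFirst kv.1) = true := by rw [hcont]; exact decide_eq_true hc
      have hcb : (!F.contains (pvFirst kv.1)) = false := by rw [hct]; rfl
      simp only [hcb, Bool.false_eq_true, if_false, PySem.Dict.modify, hcv]
      rw [PySem.Dict.items_insert_of_contains F (pvSum l (pvFirst kv.1) + kv.2) hct, ih,
        List.map_map]
      apply List.map_congr_left
      intro c' hc'
      by_cases h : c' = pvFirst kv.1
      · subst h; simp [pvSum_append]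
      · have h' : ¬ (pvFirst kv.1 = c') := fun he => h he.symm
        simp [Function.comp, h, h', pvSum_append]
    · -- fresh first char: insert branch
      have hS0 : pvSum l (pvFirst kv.1) = 0 := by
        have : ∀ kv' ∈ l, ¬ (pvFirst kv'.1 = pvFirst kv.1) := by
          intro kv' hkv' he
          exact hc (by rw [PySem.List.mem_dedup]; exact he ▸ List.mem_map_of_mem hkv')
        simp only [pvSum]
        rw [List.filter_eq_nil_iff.mpr (by intro x hx; simpa using this x hx)]
        rfl
      rw [if_neg hc]
      have hct : F.contains (pvFirst kv.1) = false := by rw [hcont]; exact decide_eq_false hc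
      have hcb : (!F.contains (pvFirst kv.1)) = true := by rw [hct]; rfl
      simp only [hcb, if_true]
      rw [PySem.Dict.items_insert_of_not_contains F kv.2 hct, ih,
        List.map_append]
      congr 1
      · apply List.map_congr_left
        intro c' hc'
        have h : ¬ (pvFirst kv.1 = c') := fun he => hc (he ▸ hc')
        simp [pvSum_append, h]
      · simp [pvSum_append, hS0]

theorem find_appearances_spec : Claim_equal_find_appearances := by
  intro pairs _ hpre
  obtain ⟨hnd, -⟩ := hpre
  unfold Spec_find_appearances find_appearances find_appearances_alt
  dsimp only []
  rw [List.foldl_map]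
  rw [PySem.List.foldl_congr_mem pairs _
    (fun d kv =>
      let c := pvFirst kv.1
      if !(d.contains c) then d.insert c kv.2 else d.modify c 0 (· + kv.2))
    PySem.Dict.empty
    (by
      intro d kv hkv
      have h : (PySem.Dict.mk pairs).get? kv.1 = some kv.2 :=
        PySem.Dict.get?_of_mem_items (PySem.Dict.mk pairs) hkv hnd
      simp [h])]
  have := pv_group_lemma pairs
  simp only [pvSum] at this
  exact this
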